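-- pv_equiv track=rewrite | github.com/swanandsv/GitMeter | ase_project/app/views.py | parse_pylint_output
-- ===== SOURCE A (Python) =====
-- def parse_pylint_output(output, errors):
--     error_count = 0
--     warning_count = 0
--     code_smells = 0
--
--     # Parse pylint output for errors, warnings, and code smells
--     for line in output.splitlines():
--         if line.startswith('E'):  # Error
--             error_count += 1
--         elif line.startswith('W'):  # Warning
--             warning_count += 1
--         elif line.startswith('C') or line.startswith('R') or line.startswith('F'):  # Code Smells
--             code_smells += 1
--
--     # Count any stderr as errors
--     error_count += len(errors.splitlines())
--
--     return error_count, warning_count, code_smells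
-- ===== SOURCE B (Python) =====
-- def parse_pylint_output(output, errors):
--     # Histogram of first characters of non-empty lines, then table lookups.
--     counts = {}
--     for line in output.splitlines():
--         if line:
--             c = line[0]
--             counts[c] = counts.get(c, 0) + 1
--     error_count = counts.get('E', 0) + len(errors.splitlines())
--     warning_count = counts.get('W', 0)
--     code_smells = counts.get('C', 0) + counts.get('R', 0) + counts.get('F', 0)
--     return error_count, warning_count, code_smells
-- ===== Notes on version B (the rewrite author's own statement) =====
-- stated objective: alternative
-- what changed: Replaces A's fused if/elif startswith loop with a dict histogram of the first character of each non-empty line built in one pass, after which the three category counts are read off by table lookups (summing C/R/F for code smells).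
import Mathlib
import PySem

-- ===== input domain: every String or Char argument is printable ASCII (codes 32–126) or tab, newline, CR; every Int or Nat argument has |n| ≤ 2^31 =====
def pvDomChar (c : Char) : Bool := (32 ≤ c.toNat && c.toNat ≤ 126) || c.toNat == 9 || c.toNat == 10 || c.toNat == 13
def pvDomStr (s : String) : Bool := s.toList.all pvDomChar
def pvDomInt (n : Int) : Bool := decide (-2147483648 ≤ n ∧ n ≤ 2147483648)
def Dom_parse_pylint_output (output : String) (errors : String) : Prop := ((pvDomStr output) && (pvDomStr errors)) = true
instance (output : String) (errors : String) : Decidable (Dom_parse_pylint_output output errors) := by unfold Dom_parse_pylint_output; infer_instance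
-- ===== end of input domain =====

-- B replaces A's fused if/elif startswith loop by a first-character histogram (dict) built in one pass, then table lookups; objective: alternative decomposition (same cost).

-- ===== PORT A =====
def parse_pylint_output (output : String) (errors : String) : Int × Int × Int :=
  let s := (PySem.Str.splitlines output).foldl
    (fun (st : Int × Int × Int) line =>
      if PySem.Str.startswith line "E" then (st.1 + 1, st.2.1, st.2.2)
      else if PySem.Str.startswith line "W" then (st.1, st.2.1 + 1, st.2.2)
      else if PySem.Str.startswith line "C" || PySem.Str.startswith line "R" || PySem.Str.startswith line "F" then
        (st.1, st.2.1, st.2.2 + 1)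
      else st) ((0 : Int), (0 : Int), (0 : Int))
  (s.1 + ((PySem.Str.splitlines errors).length : Int), s.2.1, s.2.2)

-- ===== PORT B =====
def parse_pylint_output_alt (output : String) (errors : String) : Int × Int × Int :=
  let counts := (PySem.Str.splitlines output).foldl
    (fun (d : PySem.Dict Char Int) line =>
      match line.toList with
      | [] => d
      | c :: _ => d.insert c (d.getD c 0 + 1)) PySem.Dict.empty
  (counts.getD 'E' 0 + ((PySem.Str.splitlines errors).length : Int),
   counts.getD 'W' 0,
   counts.getD 'C' 0 + counts.getD 'R' 0 + counts.getD 'F' 0)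

-- ===== PRECONDITION & SPEC =====
def Spec_parse_pylint_output (output : String) (errors : String) (out : Int × Int × Int) : Prop := out = parse_pylint_output_alt output errors
instance (output : String) (errors : String) (out : Int × Int × Int) : Decidable (Spec_parse_pylint_output output errors out) := by unfold Spec_parse_pylint_output; infer_instance

-- ===== CLAIM =====
def Claim_equal_parse_pylint_output : Prop := ∀ (output : String) (errors : String), Dom_parse_pylint_output output errors → Spec_parse_pylint_output output errors (parse_pylint_output output errors)

-- ===== LEMMAS AND PROOFS =====

-- Starting with a single-character string is exactly having that first character.
theorem pv_sw (t : List Char) (c : Char) :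
    PySem.Chars.startswith t [c] = true ↔ t.head? = some c := by
  rw [PySem.Chars.startswith_iff]
  cases t with
  | nil => simp
  | cons a s => simp [List.cons_prefix_cons, eq_comm]

-- A string cannot start with two different characters.
theorem pv_start_false (s : List Char) (a b : Char) (h : b ≠ a)
    (hs : PySem.Chars.startswith s [a] = true) :
    PySem.Chars.startswith s [b] = false := by
  rw [pv_sw] at hs
  rw [Bool.eq_false_iff]
  intro hb
  rw [pv_sw] at hb
  rw [hs] at hb
  exact h (Option.some.injEq .. ▸ hb.symm ▸ rfl)

-- A fused three-way classifying fold equals three independent countP passes, for mutually exclusive tests.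
theorem pv_foldl_counts (p q r : String → Bool)
    (hpq : ∀ l, p l = true → q l = false) (hpr : ∀ l, p l = true → r l = false)
    (hqr : ∀ l, q l = true → r l = false)
    (lines : List String) (e w c : Int) :
    lines.foldl
      (fun (st : Int × Int × Int) line =>
        if p line then (st.1 + 1, st.2.1, st.2.2)
        else if q line then (st.1, st.2.1 + 1, st.2.2)
        else if r line then (st.1, st.2.1, st.2.2 + 1)
        else st) (e, w, c)
    = (e + (lines.countP p : Int), w + (lines.countP q : Int), c + (lines.countP r : Int)) := by
  induction lines generalizing e w c with
  | nil => simp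
  | cons hd tl ih =>
    simp only [List.foldl_cons, List.countP_cons]
    by_cases hp : p hd = true
    · simp [hp, hpq hd hp, hpr hd hp, ih]
      omega
    · by_cases hq : q hd = true
      · simp [hp, hq, hqr hd hq, ih]
        omega
      · by_cases hr : r hd = true
        · simp [hp, hq, hr, ih]
          omega
        · simp [hp, hq, hr, ih]

-- counting a disjunction of disjoint tests splits into a sum
theorem pv_countP_or (p q : String → Bool) (h : ∀ a, p a = true → q a = false)
    (lines : List String) :
    lines.countP (fun a => p a || q a) = lines.countP p + lines.countP q := by
  induction lines with
  | nil => simp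
  | cons hd tl ih =>
    simp only [List.countP_cons, ih]
    by_cases hp : p hd = true
    · simp [hp, h hd hp]; omega
    · by_cases hq : q hd = true
      · simp [hp, hq]; omega
      · simp [hp, hq]

-- the histogram fold: each key holds the number of lines whose first character is that key
theorem pv_hist (lines : List String) (d : PySem.Dict Char Int) (c : Char) :
    (lines.foldl
      (fun (d : PySem.Dict Char Int) line =>
        match line.toList with
        | [] => d
        | a :: _ => d.insert a (d.getD a 0 + 1)) d).getD c 0
    = d.getD c 0 + (lines.countP (fun l => l.toList.head? == some c) : Int) := by
  induction lines generalizing d with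
  | nil => simp
  | cons hd tl ih =>
    simp only [List.foldl_cons, List.countP_cons]
    cases hhd : hd.toList with
    | nil => simp [ih]
    | cons a t =>
      simp only [ih, PySem.Dict.getD_insert]
      by_cases hca : c = a
      · simp [hca]; omega
      · have : (some a == some c) = false := by
          simp; exact fun h => hca h.symm
        simp [hca, this]

-- startswith with a one-character needle counted = first-character test counted
theorem pv_countP_sw (lines : List String) (sc : String) (c : Char) (hsc : sc.toList = [c]) :
    lines.countP (fun l => PySem.Str.startswith l sc)
    = lines.countP (fun l => l.toList.head? == some c) := by
  apply List.countP_congr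
  intro l _
  simp only [PySem.Str.startswith_eq]
  rw [hsc]
  cases hb : PySem.Chars.startswith l.toList [c] with
  | true => rw [pv_sw] at hb; simp [hb]
  | false =>
    have hne : l.toList.head? ≠ some c := fun hhd => by
      rw [← pv_sw l.toList c] at hhd
      rw [hb] at hhd; exact Bool.false_ne_true hhd
    simp [hne]

-- ===== VERDICT =====
theorem parse_pylint_output_spec : Claim_equal_parse_pylint_output := by
  intro output errors _
  unfold Spec_parse_pylint_output parse_pylint_output parse_pylint_output_alt
  rw [pv_foldl_counts
    (fun l => PySem.Str.startswith l "E")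
    (fun l => PySem.Str.startswith l "W")
    (fun l => PySem.Str.startswith l "C" || PySem.Str.startswith l "R" || PySem.Str.startswith l "F")
    (fun l h => pv_start_false l.toList 'E' 'W' (by decide) h)
    (fun l h => by
      simp only [Bool.or_eq_false_iff]
      exact ⟨⟨pv_start_false l.toList 'E' 'C' (by decide) h,
              pv_start_false l.toList 'E' 'R' (by decide) h⟩,
             pv_start_false l.toList 'E' 'F' (by decide) h⟩)
    (fun l h => by
      simp only [Bool.or_eq_false_iff]
      exact ⟨⟨pv_start_false l.toList 'W' 'C' (by decide) h,
              pv_start_false l.toList 'W' 'R' (by decide) h⟩,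
             pv_start_false l.toList 'W' 'F' (by decide) h⟩)]
  have hor : (PySem.Str.splitlines output).countP
      (fun l => PySem.Str.startswith l "C" || PySem.Str.startswith l "R" || PySem.Str.startswith l "F")
    = (PySem.Str.splitlines output).countP (fun l => PySem.Str.startswith l "C")
      + (PySem.Str.splitlines output).countP (fun l => PySem.Str.startswith l "R")
      + (PySem.Str.splitlines output).countP (fun l => PySem.Str.startswith l "F") := by
    rw [pv_countP_or (fun l => PySem.Str.startswith l "C" || PySem.Str.startswith l "R")
          (fun l => PySem.Str.startswith l "F")
          (fun l h => by
            rcases Bool.or_eq_true_iff.mp h with h' | h'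
            · exact pv_start_false l.toList 'C' 'F' (by decide) h'
            · exact pv_start_false l.toList 'R' 'F' (by decide) h'),
        pv_countP_or (fun l => PySem.Str.startswith l "C")
          (fun l => PySem.Str.startswith l "R")
          (fun l h => pv_start_false l.toList 'C' 'R' (by decide) h)]
  rw [hor]
  rw [pv_countP_sw (PySem.Str.splitlines output) "E" 'E' (by decide),
      pv_countP_sw (PySem.Str.splitlines output) "W" 'W' (by decide),
      pv_countP_sw (PySem.Str.splitlines output) "C" 'C' (by decide),
      pv_countP_sw (PySem.Str.splitlines output) "R" 'R' (by decide),
      pv_countP_sw (PySem.Str.splitlines output) "F" 'F' (by decide)]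
  simp [pv_hist]
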